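-- pv_equiv track=rewrite | github.com/duckgeunpark/BOJ | 백준/Silver/1966. 프린터 큐/프린터 큐.py | printno
-- ===== SOURCE A (Python) =====
-- from collections import deque
--
-- def printno(n: int, target: int, importantt: list) -> int:
--     # (중요도, 초기 위치) 형태로 큐 초기화
--     q = deque([(val, idx) for idx, val in enumerate(importantt)])
--     turn = 0
--
--     while q:
--         current = q.popleft()  # 1. 큐의 가장 앞에 있는 문서를 꺼냄
--
--         # 2. 나머지 문서들 중 현재 문서보다 중요도가 높은 것이 있는지 확인
--         if any(current[0] < doc[0] for doc in q):
--             q.append(current)  # 중요도가 높은 게 있다면 맨 뒤로 보냄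
--         else:
--             turn += 1  # 없다면 인쇄 (turn 증가)
--             if current[1] == target:  # 인쇄한 문서가 우리가 찾는 대상이면 종료
--                 return turn
-- ===== SOURCE B (Python) =====
-- def printno(n: int, target: int, importantt: list) -> int:
--     # One rotation per printed document: jump straight to the first max.
--     q = [(v, i) for i, v in enumerate(importantt)]
--     turn = 0
--     while q:
--         m = max(v for v, _ in q)
--         j = 0
--         while q[j][0] != m:
--             j += 1
--         turn += 1
--         if q[j][1] == target:
--             return turn
--         q = q[j + 1:] + q[:j]
-- ===== Notes on version B (the rewrite author's own statement) =====
-- stated objective: faster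
-- what changed: A rotates the deque one element at a time (checking all remaining priorities at each rotation); B finds the maximum priority, jumps straight to its first occurrence and prints it, doing one scan and one slice per printed document.
-- outside the precondition, e.g. on printno(2, 5, [1, 2]): A returns None, B returns None
import Mathlib
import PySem

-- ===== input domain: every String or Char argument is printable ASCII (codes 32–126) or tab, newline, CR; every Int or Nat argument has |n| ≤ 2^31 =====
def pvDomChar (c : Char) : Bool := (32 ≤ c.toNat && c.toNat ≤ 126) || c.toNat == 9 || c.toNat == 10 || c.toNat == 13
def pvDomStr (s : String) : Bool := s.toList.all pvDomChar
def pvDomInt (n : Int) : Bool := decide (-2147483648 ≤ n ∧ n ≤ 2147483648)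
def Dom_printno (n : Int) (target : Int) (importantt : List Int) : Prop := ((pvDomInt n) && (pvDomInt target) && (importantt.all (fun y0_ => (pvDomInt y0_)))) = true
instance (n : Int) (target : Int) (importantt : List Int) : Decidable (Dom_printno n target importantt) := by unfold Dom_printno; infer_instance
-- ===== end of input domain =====

-- B changes the algorithm: instead of rotating the queue one element at a time until the
-- front is maximal (A), it jumps straight to the first maximum-priority document each round.

-- Shared helpers: max of the priority values and index of its first occurrence.
-- The lemmas directly below are cited by the ports' termination proofs (decreasing_by).

-- max of the first components (B's  max(v for v, _ in q)); meaningful for q ≠ []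
def maxV : List (Int × Int) → Int
  | [] => 0
  | [d] => d.1
  | d :: e :: rest => max d.1 (maxV (e :: rest))

-- index of the first pair whose value equals m (B's inner scanning while-loop)
def firstEq (m : Int) : List (Int × Int) → Nat
  | [] => 0
  | d :: rest => if d.1 = m then 0 else firstEq m rest + 1

theorem maxV_cons (c : Int × Int) (rest : List (Int × Int)) (h : rest ≠ []) :
    maxV (c :: rest) = max c.1 (maxV rest) := by
  cases rest with
  | nil => exact absurd rfl h
  | cons e r => rfl

theorem maxV_append_single (l : List (Int × Int)) (c : Int × Int) (h : l ≠ []) :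
    maxV (l ++ [c]) = max (maxV l) c.1 := by
  induction l with
  | nil => exact absurd rfl h
  | cons e r ih =>
    cases r with
    | nil => simp [maxV]
    | cons f s =>
      rw [List.cons_append, maxV_cons e ((f :: s) ++ [c]) (by simp),
          maxV_cons e (f :: s) (by simp), ih (by simp), max_assoc]

theorem le_maxV (q : List (Int × Int)) (d : Int × Int) (hd : d ∈ q) : d.1 ≤ maxV q := by
  induction q with
  | nil => cases hd
  | cons c rest ih =>
    cases rest with
    | nil => rcases List.mem_singleton.mp hd with h; simp [h, maxV]
    | cons e r =>
      rw [maxV_cons c (e :: r) (by simp)]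
      rcases List.mem_cons.mp hd with h | h
      · simp [h]
      · exact le_max_of_le_right (ih h)

theorem exists_maxV (q : List (Int × Int)) (h : q ≠ []) : ∃ d ∈ q, d.1 = maxV q := by
  induction q with
  | nil => exact absurd rfl h
  | cons c rest ih =>
    cases rest with
    | nil => exact ⟨c, by simp, rfl⟩
    | cons e r =>
      rw [maxV_cons c (e :: r) (by simp)]
      rcases ih (by simp) with ⟨d, hd, hv⟩
      rcases le_or_gt (maxV (e :: r)) c.1 with hle | hlt
      · exact ⟨c, by simp, by simp [max_eq_left hle]⟩
      · exact ⟨d, by simp [hd], by rw [hv]; exact (max_eq_right (le_of_lt hlt)).symm⟩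

theorem firstEq_lt_length (m : Int) (q : List (Int × Int)) (h : ∃ d ∈ q, d.1 = m) :
    firstEq m q < q.length := by
  induction q with
  | nil => rcases h with ⟨d, hd, _⟩; cases hd
  | cons c rest ih =>
    by_cases hc : c.1 = m
    · simp [firstEq, hc]
    · rcases h with ⟨d, hd, hv⟩
      rcases List.mem_cons.mp hd with h1 | h1
      · exact absurd (h1 ▸ hv) hc
      · simpa [firstEq, hc, Nat.succ_lt_succ_iff] using ih ⟨d, h1, hv⟩

theorem firstEq_append (m : Int) (l l' : List (Int × Int)) (h : ∃ d ∈ l, d.1 = m) :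
    firstEq m (l ++ l') = firstEq m l := by
  induction l with
  | nil => rcases h with ⟨d, hd, _⟩; cases hd
  | cons c rest ih =>
    by_cases hc : c.1 = m
    · simp [firstEq, hc]
    · rcases h with ⟨d, hd, hv⟩
      rcases List.mem_cons.mp hd with h1 | h1
      · exact absurd (h1 ▸ hv) hc
      · simp [firstEq, hc, ih ⟨d, h1, hv⟩]

-- one rotation of A's loop keeps the max and moves its first occurrence one step forward
theorem rot_measure (c : Int × Int) (rest : List (Int × Int))
    (h : rest.any (fun d => c.1 < d.1) = true) :
    maxV (rest ++ [c]) = maxV (c :: rest) ∧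
      firstEq (maxV (c :: rest)) (rest ++ [c]) + 1 = firstEq (maxV (c :: rest)) (c :: rest) := by
  rcases List.any_eq_true.mp h with ⟨d, hd, hlt⟩
  have hlt' : c.1 < d.1 := by exact_mod_cast of_decide_eq_true hlt
  have hrest : rest ≠ [] := by rintro rfl; cases hd
  have hcm : c.1 < maxV rest := lt_of_lt_of_le hlt' (le_maxV rest d hd)
  have hmax : maxV (c :: rest) = maxV rest := by
    rw [maxV_cons c rest hrest]; exact max_eq_right (le_of_lt hcm)
  have hmax2 : maxV (rest ++ [c]) = maxV rest := by
    rw [maxV_append_single rest c hrest]; exact max_eq_left (le_of_lt hcm)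
  refine ⟨by rw [hmax, hmax2], ?_⟩
  rw [hmax, firstEq_append _ _ _ (exists_maxV rest hrest)]
  simp [firstEq, ne_of_lt hcm]

-- ===== PORT A =====
-- the deque loop of A: pop the front; if any remaining doc is strictly more important,
-- push the front to the back; otherwise print it (turn += 1) and stop if it is the target.
def printnoLoop (target : Int) (q : List (Int × Int)) (turn : Int) : Int :=
  match q with
  | [] => 0   -- Python falls off the while and returns None here; excluded by Pre_
  | c :: rest =>
    if rest.any (fun d => c.1 < d.1) then
      printnoLoop target (rest ++ [c]) turn
    else
      if c.2 = target then turn + 1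
      else printnoLoop target rest (turn + 1)
termination_by (q.length, firstEq (maxV q) q)
decreasing_by
  · rcases rot_measure c rest (by assumption) with ⟨h1, h2⟩
    have h3 : (rest ++ [c]).length = (c :: rest).length := by simp
    have h4 : firstEq (maxV (rest ++ [c])) (rest ++ [c]) < firstEq (maxV (c :: rest)) (c :: rest) := by
      rw [h1]; omega
    apply Prod.Lex.right'
    · exact le_of_eq h3
    · exact h4
  · apply Prod.Lex.left; simp

def printno (n : Int) (target : Int) (importantt : List Int) : Int :=
  printnoLoop target ((PySem.List.enumerate importantt 0).map (fun p => (p.2, p.1))) 0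

-- ===== PORT B =====
-- Source B's loop: find the max priority, scan for its first position j, print q[j],
-- continue with q[j+1:] + q[:j].
def printnoAltLoop (target : Int) (q : List (Int × Int)) (turn : Int) : Int :=
  match q with
  | [] => 0   -- Python falls off the while and returns None here; excluded by Pre_
  | c :: rest =>
    let m := maxV (c :: rest)
    let j := firstEq m (c :: rest)
    if ((c :: rest).getD j (0, 0)).2 = target then turn + 1
    else printnoAltLoop target ((c :: rest).drop (j + 1) ++ (c :: rest).take j) (turn + 1)
termination_by q.length
decreasing_by
  have hj : firstEq (maxV (c :: rest)) (c :: rest) < (c :: rest).length :=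
    firstEq_lt_length _ _ (exists_maxV (c :: rest) (by simp))
  simp only [List.length_append, List.length_drop, List.length_take]
  simp at hj ⊢
  omega

def printno_alt (n : Int) (target : Int) (importantt : List Int) : Int :=
  printnoAltLoop target ((PySem.List.enumerate importantt 0).map (fun p => (p.2, p.1))) 0

-- ===== PRECONDITION & SPEC =====
-- Pre_ excludes target indices outside the queue (target < 0 or ≥ len), on which the
-- Python A falls off its while loop and returns None, not an int.
def Pre_printno (n : Int) (target : Int) (importantt : List Int) : Prop :=
  ∃ k : Fin importantt.length, target = (k : Int)
instance (n : Int) (target : Int) (importantt : List Int) : Decidable (Pre_printno n target importantt) := by unfold Pre_printno; infer_instance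

def pvWitness_printno : Int × Int × List Int := (4, 2, [1, 2, 3, 2])

def Spec_printno (n : Int) (target : Int) (importantt : List Int) (out : Int) : Prop := out = printno_alt n target importantt
instance (n : Int) (target : Int) (importantt : List Int) (out : Int) : Decidable (Spec_printno n target importantt out) := by unfold Spec_printno; infer_instance

-- ===== CLAIM (what is proved, stated in full; the proofs are below) =====
def Claim_equal_printno : Prop := ∀ (n : Int) (target : Int) (importantt : List Int), Dom_printno n target importantt → Pre_printno n target importantt → Spec_printno n target importantt (printno n target importantt)

-- ===== LEMMAS AND PROOFS =====

-- A's loop absorbs rotations: rotating until the first max is at the front,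
-- then printing it, is exactly one step of B's loop.
theorem printnoLoop_rot_aux (target : Int) : ∀ (j : Nat) (q : List (Int × Int)) (turn : Int), q ≠ [] →
    firstEq (maxV q) q = j →
    printnoLoop target q turn =
      if (q.getD j (0, 0)).2 = target then turn + 1
      else printnoLoop target (q.drop (j + 1) ++ q.take j) (turn + 1) := by
  intro j
  induction j with
  | zero =>
    intro q turn hq hj
    cases q with
    | nil => exact absurd rfl hq
    | cons c rest =>
      have hc : c.1 = maxV (c :: rest) := by
        by_contra hne
        simp [firstEq, hne] at hj
      have hany : rest.any (fun d => c.1 < d.1) = false := by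
        rw [List.any_eq_false]
        intro d hd
        have := le_maxV (c :: rest) d (by simp [hd])
        simp only [decide_eq_true_eq]
        omega
      rw [printnoLoop, if_neg (by simp [hany])]
      simp
  | succ k ih =>
    intro q turn hq hj
    cases q with
    | nil => exact absurd rfl hq
    | cons c rest =>
      have hcne : c.1 ≠ maxV (c :: rest) := by
        intro hc; simp [firstEq, hc] at hj
      rcases exists_maxV (c :: rest) (by simp) with ⟨d, hd, hv⟩
      have hdrest : d ∈ rest := by
        rcases List.mem_cons.mp hd with h1 | h1
        · exact absurd (h1 ▸ hv) hcne
        · exact h1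
      have hclt : c.1 < d.1 := by
        have h1 := le_maxV (c :: rest) c (by simp)
        omega
      have hany : rest.any (fun d => c.1 < d.1) = true :=
        List.any_eq_true.mpr ⟨d, hdrest, by simp [hclt]⟩
      rcases rot_measure c rest hany with ⟨hm, hf⟩
      have hk : firstEq (maxV (rest ++ [c])) (rest ++ [c]) = k := by
        rw [hm]; omega
      have hklt : k < rest.length := by
        have := firstEq_lt_length (maxV (c :: rest)) (c :: rest)
          (exists_maxV _ (by simp))
        simp [hj] at this
        omega
      rw [printnoLoop, if_pos hany, ih (rest ++ [c]) turn (by simp) hk]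
      have hget : (rest ++ [c]).getD k (0, 0) = (c :: rest).getD (k + 1) (0, 0) := by
        simp [List.getD, List.getElem?_append_left hklt]
      have hq' : (rest ++ [c]).drop (k + 1) ++ (rest ++ [c]).take k
          = (c :: rest).drop (k + 1 + 1) ++ (c :: rest).take (k + 1) := by
        rw [List.drop_append_of_le_length (by omega), List.take_append_of_le_length (by omega)]
        simp
      rw [hget, hq']

theorem printnoLoop_rot (target : Int) (q : List (Int × Int)) (turn : Int) (hq : q ≠ []) :
    printnoLoop target q turn =
      if (q.getD (firstEq (maxV q) q) (0, 0)).2 = target then turn + 1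
      else printnoLoop target (q.drop (firstEq (maxV q) q + 1) ++ q.take (firstEq (maxV q) q)) (turn + 1) :=
  printnoLoop_rot_aux target _ q turn hq rfl

theorem loops_eq (target : Int) (q : List (Int × Int)) (turn : Int) :
    printnoLoop target q turn = printnoAltLoop target q turn := by
  cases q with
  | nil => rw [printnoLoop, printnoAltLoop]
  | cons c rest =>
    rw [printnoLoop_rot target (c :: rest) turn (by simp), printnoAltLoop]
    split
    · rfl
    · exact loops_eq target _ (turn + 1)
termination_by q.length
decreasing_by
  have hj : firstEq (maxV (c :: rest)) (c :: rest) < (c :: rest).length :=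
    firstEq_lt_length _ _ (exists_maxV (c :: rest) (by simp))
  simp only [List.length_append, List.length_drop, List.length_take]
  simp at hj ⊢
  omega

-- ===== VERDICT (by name: the statement is the Claim_ definition above) =====
theorem printno_spec : Claim_equal_printno := by
  intro n target importantt _ _
  unfold Spec_printno printno printno_alt
  exact loops_eq _ _ _
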